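-- pv_equiv track=rewrite | github.com/jmwerner/recipes | generator/webpageGenerator.py | recipe_categories_exist
-- ===== SOURCE A (Python) =====
-- def recipe_categories_exist(ingredients_list, name_of_recipe):
--     '''Checks to see if recipe categories exist and makes sure all categories
--        are either filled in or all are empty.
--     Args:
--         ingredients_list (list): List of ingredients from recipe json.
--         name_of_recipe (string): Name of current recipe.
--     Returns:
--         bool: Indicator of category existence.
--     '''
--     if 'category' not in list(ingredients_list[0].keys()):
--         # Accomodation for older versions of the recipe input app
--         categories_exist = False
--     else:
--         all_categories = []
--         for i in range(0, len(ingredients_list)):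
--             if ingredients_list[i]['number'] != ['']:
--                 all_categories.append(ingredients_list[i]['category'][0])
--         unique_categories = list(set(all_categories))
--         if '' in unique_categories:
--             if len(unique_categories) > 1:
--                 raise ValueError('Not all categories were filled in for ' + \
--                     name_of_recipe)
--             else:
--                 categories_exist = False
--         else:
--             categories_exist = True
--     return categories_exist
-- ===== SOURCE B (Python) =====
-- def recipe_categories_exist(ingredients_list, name_of_recipe):
--     '''Single pass with two booleans instead of building a list and a set.'''
--     if 'category' not in list(ingredients_list[0].keys()):
--         return False
--     has_empty = False
--     has_nonempty = False
--     for ingredient in ingredients_list: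
--         if ingredient['number'] != ['']:
--             if ingredient['category'][0] == '':
--                 has_empty = True
--             else:
--                 has_nonempty = True
--     if has_empty and has_nonempty:
--         raise ValueError('Not all categories were filled in for ' + \
--             name_of_recipe)
--     return not has_empty
-- ===== Notes on version B (the rewrite author's own statement) =====
-- stated objective: simpler
-- what changed: Replaces the collect-all-category-heads list plus set-deduplication and membership/size tests by a single pass that maintains two booleans (has_empty, has_nonempty) and decides directly from them, with early return for the missing-'category' case.
import Mathlib
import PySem

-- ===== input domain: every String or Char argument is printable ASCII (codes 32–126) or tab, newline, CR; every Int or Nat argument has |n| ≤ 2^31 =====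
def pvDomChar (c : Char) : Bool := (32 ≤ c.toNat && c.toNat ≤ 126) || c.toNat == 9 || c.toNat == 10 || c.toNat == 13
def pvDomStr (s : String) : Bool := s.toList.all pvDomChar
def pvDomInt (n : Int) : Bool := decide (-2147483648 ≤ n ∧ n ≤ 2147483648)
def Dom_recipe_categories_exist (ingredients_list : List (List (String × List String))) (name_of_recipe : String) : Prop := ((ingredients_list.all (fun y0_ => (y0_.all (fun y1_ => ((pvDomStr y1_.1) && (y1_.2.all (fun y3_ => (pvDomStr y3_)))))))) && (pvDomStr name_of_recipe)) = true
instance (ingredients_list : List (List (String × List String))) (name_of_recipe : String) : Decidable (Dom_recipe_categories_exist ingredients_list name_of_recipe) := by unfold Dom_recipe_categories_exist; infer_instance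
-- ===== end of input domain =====

-- B replaces A's list-of-categories + set deduplication by a single pass keeping two booleans (simpler; same cost).


-- shared helpers: d[k] with default [] (the default is only reached outside Pre_), the 'number != ['']' filter,
-- and ingredient['category'][0] (default "" only reached outside Pre_)
def pvGetKey (d : List (String × List String)) (k : String) : List String :=
  (PySem.Dict.mk d).getD k []

def pvFilt (d : List (String × List String)) : Bool :=
  pvGetKey d "number" != [""]

def pvCatHead (d : List (String × List String)) : String :=
  PySem.List.pyGetD (pvGetKey d "category") 0 ""

-- ===== PORT A =====
def recipe_categories_exist (ingredients_list : List (List (String × List String))) (name_of_recipe : String) : Bool :=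
  if ((PySem.Dict.mk (ingredients_list.headD [])).keys.contains "category") = false then
    false
  else
    let all_categories := (PySem.List.pyRange 0 (PySem.List.len ingredients_list)).foldl
      (fun acc i =>
        let d := PySem.List.pyGetD ingredients_list i []
        if pvFilt d then acc ++ [pvCatHead d] else acc) []
    let unique_categories : PySem.Set String := PySem.Set.ofList all_categories
    if unique_categories.contains "" then
      if unique_categories.length > 1 then
        false  -- Python raises ValueError here; excluded by Pre_
      else
        false
    else
      true

-- ===== PORT B =====
def recipe_categories_exist_alt (ingredients_list : List (List (String × List String))) (name_of_recipe : String) : Bool :=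
  if ((PySem.Dict.mk (ingredients_list.headD [])).keys.contains "category") = false then
    false
  else
    let flags := ingredients_list.foldl
      (fun (p : Bool × Bool) d =>
        if pvFilt d then
          if pvCatHead d == "" then (true, p.2) else (p.1, true)
        else p) (false, false)
    if flags.1 && flags.2 then
      false  -- Python raises ValueError here; excluded by Pre_
    else
      !flags.1

-- ===== PRECONDITION & SPEC =====
-- Pre_ excludes exactly the inputs on which A raises: the empty list (IndexError on [0]); and, when the first
-- dict has a 'category' key: a dict missing 'number' (KeyError), a counted dict with missing or empty 'category'
-- (KeyError/IndexError), and a mix of empty and non-empty category heads (ValueError).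
def Pre_recipe_categories_exist (ingredients_list : List (List (String × List String))) (name_of_recipe : String) : Prop :=
  ingredients_list ≠ [] ∧
  (((PySem.Dict.mk (ingredients_list.headD [])).keys.contains "category") = true →
    (∀ d ∈ ingredients_list, ((PySem.Dict.mk d).get? "number").isSome) ∧
    (∀ d ∈ ingredients_list, pvFilt d = true →
      ((PySem.Dict.mk d).get? "category").isSome ∧ pvGetKey d "category" ≠ []) ∧
    ¬((∃ d ∈ ingredients_list, pvFilt d = true ∧ pvCatHead d = "") ∧
      (∃ d ∈ ingredients_list, pvFilt d = true ∧ pvCatHead d ≠ "")))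
instance (ingredients_list : List (List (String × List String))) (name_of_recipe : String) : Decidable (Pre_recipe_categories_exist ingredients_list name_of_recipe) := by unfold Pre_recipe_categories_exist; infer_instance

def pvWitness_recipe_categories_exist : (List (List (String × List String))) × String :=
  ([[("category", ["veg"]), ("number", ["1"])]], "soup")

def Spec_recipe_categories_exist (ingredients_list : List (List (String × List String))) (name_of_recipe : String) (out : Bool) : Prop := out = recipe_categories_exist_alt ingredients_list name_of_recipe
instance (ingredients_list : List (List (String × List String))) (name_of_recipe : String) (out : Bool) : Decidable (Spec_recipe_categories_exist ingredients_list name_of_recipe out) := by unfold Spec_recipe_categories_exist; infer_instance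

-- ===== CLAIM (what is proved, stated in full; the proofs are below) =====
def Claim_equal_recipe_categories_exist : Prop := ∀ (ingredients_list : List (List (String × List String))) (name_of_recipe : String), Dom_recipe_categories_exist ingredients_list name_of_recipe → Pre_recipe_categories_exist ingredients_list name_of_recipe → Spec_recipe_categories_exist ingredients_list name_of_recipe (recipe_categories_exist ingredients_list name_of_recipe)

-- ===== LEMMAS AND PROOFS =====

-- A's loop over range(0, len(il)) collects exactly the category heads of the counted ingredients.
theorem cats_eq (il : List (List (String × List String))) :
    (PySem.List.pyRange 0 (PySem.List.len il)).foldl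
      (fun acc i =>
        let d := PySem.List.pyGetD il i []
        if pvFilt d then acc ++ [pvCatHead d] else acc) []
    = (il.filter pvFilt).map pvCatHead := by
  rw [PySem.List.foldl_pyRange_pyGetD il [] (fun acc d => if pvFilt d then acc ++ [pvCatHead d] else acc) [] le_rfl]
  simp [PySem.List.foldl_append_if]

-- B's fold computes the two 'any' flags over the counted ingredients.
theorem flags_eq (il : List (List (String × List String))) (p : Bool × Bool) :
    il.foldl (fun (p : Bool × Bool) d =>
        if pvFilt d then
          if pvCatHead d == "" then (true, p.2) else (p.1, true)
        else p) p
    = (p.1 || il.any (fun d => pvFilt d && (pvCatHead d == "")),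
       p.2 || il.any (fun d => pvFilt d && (pvCatHead d != ""))) := by
  induction il generalizing p with
  | nil => simp
  | cons d t ih =>
    rw [List.foldl_cons, ih]
    by_cases hf : pvFilt d = true
    · by_cases he : pvCatHead d = ""
      · simp [hf, he]
      · have he' : (pvCatHead d == "") = false := by simpa using he
        simp [hf, he, he']
    · simp [hf]

-- Under the 'category'-present guard, A's value is the negated ""-membership test on the collected heads.
theorem aval (il : List (List (String × List String))) (name : String)
    (h : ((PySem.Dict.mk (il.headD [])).keys.contains "category") = true) :
    recipe_categories_exist il name
    = !((PySem.Set.ofList ((il.filter pvFilt).map pvCatHead)).contains "") := by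
  simp only [recipe_categories_exist, cats_eq]
  rw [if_neg (by rw [h]; simp)]
  cases hc : (PySem.Set.ofList ((il.filter pvFilt).map pvCatHead)).contains "" with
  | true => simp
  | false => simp

-- Under the same guard, B's value in terms of the two 'any' flags.
theorem bval (il : List (List (String × List String))) (name : String)
    (h : ((PySem.Dict.mk (il.headD [])).keys.contains "category") = true) :
    recipe_categories_exist_alt il name
    = (if (il.any (fun d => pvFilt d && (pvCatHead d == "")))
          && (il.any (fun d => pvFilt d && (pvCatHead d != ""))) then false
       else !(il.any (fun d => pvFilt d && (pvCatHead d == "")))) := by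
  simp only [recipe_categories_exist_alt, flags_eq, Bool.false_or]
  rw [if_neg (by rw [h]; simp)]

-- ===== VERDICT (by name: the statement is the Claim_ definition above) =====
theorem recipe_categories_exist_spec : Claim_equal_recipe_categories_exist := by
  intro il name _ hpre
  unfold Spec_recipe_categories_exist
  by_cases hg : ((PySem.Dict.mk (il.headD [])).keys.contains "category") = false
  · simp only [recipe_categories_exist, recipe_categories_exist_alt]
    rw [if_pos hg, if_pos hg]
  · have hg' : ((PySem.Dict.mk (il.headD [])).keys.contains "category") = true := by
      simpa using hg
    obtain ⟨-, hmain⟩ := hpre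
    obtain ⟨-, -, hmix⟩ := hmain hg'
    rw [aval il name hg', bval il name hg']
    have hE : ((PySem.Set.ofList ((il.filter pvFilt).map pvCatHead)).contains "")
        = il.any (fun d => pvFilt d && (pvCatHead d == "")) := by
      apply Bool.coe_iff_coe.mp
      simp only [PySem.Set.contains, List.contains_iff_mem,
        PySem.Set.mem_ofList, List.mem_map, List.mem_filter, List.any_eq_true,
        Bool.and_eq_true, beq_iff_eq]
      constructor
      · rintro ⟨d, ⟨hd, hfd⟩, hcd⟩; exact ⟨d, hd, hfd, hcd⟩
      · rintro ⟨d, hd, hfd, hcd⟩; exact ⟨d, ⟨hd, hfd⟩, hcd⟩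
    have hen : ((il.any (fun d => pvFilt d && (pvCatHead d == "")))
        && (il.any (fun d => pvFilt d && (pvCatHead d != "")))) = false := by
      by_contra hcon
      apply hmix
      rw [Bool.not_eq_false, Bool.and_eq_true] at hcon
      obtain ⟨h1, h2⟩ := hcon
      simp only [List.any_eq_true, Bool.and_eq_true, beq_iff_eq, bne_iff_ne] at h1 h2
      exact ⟨h1, h2⟩
    rw [hE, hen, if_neg (by simp)]
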